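-- pv_equiv track=rewrite | github.com/Art200507/SchemaMorph | Georgia Tech University/formatting.py | parse_faculty_text
-- ===== SOURCE A (Python) =====
-- def parse_faculty_text(text):
--     """
--     Parse faculty data from 3-line format.
--
--     Args:
--         text (str): Multi-line faculty data
--
--     Returns:
--         list: List of faculty dictionaries
--     """
--     lines = [line.strip() for line in text.split('\n') if line.strip()]
--     faculty_list = []
--
--     # Process every 3 lines as a faculty entry
--     for i in range(0, len(lines), 3):
--         if i + 2 < len(lines):
--             name = lines[i].strip()
--             degree_university = lines[i + 1].strip()
--             rank_department = lines[i + 2].strip()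
--
--             # Simply format as: Name, Degree University, Rank Department
--             faculty_list.append(f"{name}, {degree_university}, {rank_department}")
--
--     return faculty_list
-- ===== SOURCE B (Python) =====
-- def parse_faculty_text(text):
--     lines = [line.strip() for line in text.split('\n') if line.strip()]
--     return [f"{name}, {degree_university}, {rank_department}"
--             for name, degree_university, rank_department in zip(*[iter(lines)] * 3)]
-- ===== Notes on version B (the rewrite author's own statement) =====
-- stated objective: idiomatic
-- what changed: Replaces the index-stepping loop over range(0, len, 3) with its i+2 < len bound check, three indexed lookups and redundant re-strips by grouping the stripped lines into complete triples via zip(*[iter(lines)]*3) and formatting each triple in a comprehension.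
import Mathlib
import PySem

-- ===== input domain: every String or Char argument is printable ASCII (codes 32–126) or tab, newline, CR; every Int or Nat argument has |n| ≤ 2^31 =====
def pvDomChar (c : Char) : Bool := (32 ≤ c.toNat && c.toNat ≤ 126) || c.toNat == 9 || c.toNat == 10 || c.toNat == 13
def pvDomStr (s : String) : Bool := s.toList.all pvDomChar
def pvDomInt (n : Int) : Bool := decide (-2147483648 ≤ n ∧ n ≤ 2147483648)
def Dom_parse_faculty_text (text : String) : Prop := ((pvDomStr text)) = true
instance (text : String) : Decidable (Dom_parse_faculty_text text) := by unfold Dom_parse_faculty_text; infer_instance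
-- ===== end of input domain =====

-- B replaces A's index-stepping loop by grouping the stripped lines into complete triples and mapping over them; idiomatic, same cost.

-- ===== PORT A =====
def parse_faculty_text (text : String) : List String :=
  let lines := ((PySem.Chars.splitOn text.toList ['\n']).map PySem.Chars.strip).filter (fun l => l ≠ [])
  (PySem.List.pyRange 0 (PySem.List.len lines) 3).foldl (fun acc i =>
    if i + 2 < PySem.List.len lines then
      acc ++ [String.ofList (PySem.Chars.strip (PySem.List.pyGetD lines i []) ++ [',', ' '] ++
                         PySem.Chars.strip (PySem.List.pyGetD lines (i + 1) []) ++ [',', ' '] ++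
                         PySem.Chars.strip (PySem.List.pyGetD lines (i + 2) []))]
    else acc) []

-- ===== PORT B =====
-- grouping into complete triples, as zip(*[iter(lines)]*3) does (a leftover of 1–2 lines is dropped)
def pvChunks3 : List (List Char) → List (List Char × List Char × List Char)
  | a :: b :: c :: rest => (a, b, c) :: pvChunks3 rest
  | _ => []

def parse_faculty_text_alt (text : String) : List String :=
  let lines := ((PySem.Chars.splitOn text.toList ['\n']).map PySem.Chars.strip).filter (fun l => l ≠ [])
  (pvChunks3 lines).map (fun t => String.ofList (t.1 ++ [',', ' '] ++ t.2.1 ++ [',', ' '] ++ t.2.2))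

-- ===== PRECONDITION & SPEC =====
def Spec_parse_faculty_text (text : String) (out : List String) : Prop := out = parse_faculty_text_alt text
instance (text : String) (out : List String) : Decidable (Spec_parse_faculty_text text out) := by unfold Spec_parse_faculty_text; infer_instance

-- ===== CLAIM (what is proved, stated in full; the proofs are below) =====
def Claim_equal_parse_faculty_text : Prop := ∀ (text : String), Dom_parse_faculty_text text → Spec_parse_faculty_text text (parse_faculty_text text)

-- ===== LEMMAS AND PROOFS =====

-- strip is idempotent, so A's re-strip of the already-stripped lines is the identity
lemma pv_take_dropWhile (p : Char → Bool) (l : List Char) (h : l.dropWhile p = l) (k : Nat) :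
    (l.take k).dropWhile p = l.take k := by
  cases l with
  | nil => simp
  | cons a t =>
    cases k with
    | zero => simp
    | succ k =>
      rw [List.dropWhile_eq_self_iff] at h ⊢
      intro _
      simpa using h (by simp)

lemma pv_lstrip_of_fix (l : List Char) (h : l.dropWhile PySem.Chars.isspace = l) :
    PySem.Chars.lstrip (PySem.Chars.rstrip l) = PySem.Chars.rstrip l := by
  have hsuf : (l.reverse.dropWhile PySem.Chars.isspace) <:+ l.reverse := List.dropWhile_suffix _
  have hpre : PySem.Chars.rstrip l <+: l := by
    have := List.reverse_prefix.mpr hsuf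
    simpa [PySem.Chars.rstrip] using this
  have hk := List.prefix_iff_eq_take.mp hpre
  rw [hk]
  simpa [PySem.Chars.lstrip] using pv_take_dropWhile _ l h (PySem.Chars.rstrip l).length

lemma pv_strip_fix (s : List Char) :
    PySem.Chars.strip (PySem.Chars.strip s) = PySem.Chars.strip s := by
  have h1 : (PySem.Chars.lstrip s).dropWhile PySem.Chars.isspace = PySem.Chars.lstrip s := by
    simp [PySem.Chars.lstrip, List.dropWhile_idempotent]
  show PySem.Chars.rstrip (PySem.Chars.lstrip (PySem.Chars.rstrip (PySem.Chars.lstrip s)))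
      = PySem.Chars.rstrip (PySem.Chars.lstrip s)
  rw [pv_lstrip_of_fix _ h1]
  simp [PySem.Chars.rstrip, List.dropWhile_idempotent]

-- pyRange 0 n 3 peeled one element at a time, as a shifted pyRange 0 (n-3) 3
lemma pv_pyRange_cons3 (n : Int) (h : 0 < n) :
    PySem.List.pyRange 0 n 3 = 0 :: (PySem.List.pyRange 0 (n - 3) 3).map (· + 3) := by
  rw [PySem.List.pyRange_of_pos 0 n (by norm_num), PySem.List.pyRange_of_pos 0 (n - 3) (by norm_num)]
  rw [if_pos h]
  by_cases h3 : 0 < n - 3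
  · rw [if_pos h3]
    have hm : ((n - 0 + 3 - 1) / 3).toNat = ((n - 3 - 0 + 3 - 1) / 3).toNat + 1 := by omega
    rw [hm, List.range_succ_eq_map]
    simp [List.map_map, Function.comp]
    intro k _
    ring
  · rw [if_neg h3]
    have hm : ((n - 0 + 3 - 1) / 3).toNat = 1 := by omega
    rw [hm]
    simp [List.range_succ]

lemma pv_pyGetD_cons_succ (x : List Char) (xs : List (List Char)) (i : Int) (hi : 0 ≤ i) (d : List Char) :
    PySem.List.pyGetD (x :: xs) (i + 1) d = PySem.List.pyGetD xs i d := by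
  rw [PySem.List.pyGetD_of_nonneg _ _ (by omega), PySem.List.pyGetD_of_nonneg _ _ hi]
  have h1 : (i + 1).toNat = i.toNat + 1 := by omega
  rw [h1]
  simp

-- the invariant: A's indexed fold over stripped lines emits exactly B's formatted triples
lemma pv_loop_eq (xs : List (List Char)) (hx : ∀ l ∈ xs, PySem.Chars.strip l = l) (acc : List String) :
    (PySem.List.pyRange 0 (PySem.List.len xs) 3).foldl (fun ac i =>
      if i + 2 < PySem.List.len xs then
        ac ++ [String.ofList (PySem.Chars.strip (PySem.List.pyGetD xs i []) ++ [',', ' '] ++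
                          PySem.Chars.strip (PySem.List.pyGetD xs (i + 1) []) ++ [',', ' '] ++
                          PySem.Chars.strip (PySem.List.pyGetD xs (i + 2) []))]
      else ac) acc
    = acc ++ (pvChunks3 xs).map (fun t => String.ofList (t.1 ++ [',', ' '] ++ t.2.1 ++ [',', ' '] ++ t.2.2)) := by
  induction xs using pvChunks3.induct generalizing acc with
  | case1 a b c rest ih =>
    have hn : PySem.List.len (a :: b :: c :: rest) = (rest.length : Int) + 3 := by
      simp [PySem.List.len_eq]; ring
    have hln : PySem.List.len rest = (rest.length : Int) := by simp [PySem.List.len_eq]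
    rw [hn, pv_pyRange_cons3 _ (by positivity), List.foldl_cons, List.foldl_map]
    rw [if_pos (by omega : (0:Int) + 2 < (rest.length : Int) + 3)]
    have e0 : PySem.List.pyGetD (a :: b :: c :: rest) 0 [] = a := PySem.List.pyGetD_zero_cons _ _ _
    have e1 : PySem.List.pyGetD (a :: b :: c :: rest) (0 + 1) [] = b := by
      rw [pv_pyGetD_cons_succ _ _ 0 le_rfl]
      exact PySem.List.pyGetD_zero_cons _ _ _
    have e2 : PySem.List.pyGetD (a :: b :: c :: rest) (0 + 2) [] = c := by
      rw [show (0:Int) + 2 = (0 + 1) + 1 from by ring, pv_pyGetD_cons_succ _ _ (0 + 1) (by omega),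
        pv_pyGetD_cons_succ _ _ 0 le_rfl]
      exact PySem.List.pyGetD_zero_cons _ _ _
    rw [e0, e1, e2, hx a (by simp), hx b (by simp), hx c (by simp)]
    have s1 : ∀ j : Int, 0 ≤ j → PySem.List.pyGetD (a :: b :: c :: rest) (j + 3) [] = PySem.List.pyGetD rest j [] := by
      intro j hj
      rw [show j + 3 = ((j + 1) + 1) + 1 from by ring, pv_pyGetD_cons_succ _ _ _ (by omega),
        pv_pyGetD_cons_succ _ _ _ (by omega), pv_pyGetD_cons_succ _ _ _ hj]
    rw [show (rest.length : Int) + 3 - 3 = (rest.length : Int) from by ring]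
    rw [PySem.List.foldl_congr_mem _ _ (fun ac i =>
      if i + 2 < PySem.List.len rest then
        ac ++ [String.ofList (PySem.Chars.strip (PySem.List.pyGetD rest i []) ++ [',', ' '] ++
                          PySem.Chars.strip (PySem.List.pyGetD rest (i + 1) []) ++ [',', ' '] ++
                          PySem.Chars.strip (PySem.List.pyGetD rest (i + 2) []))]
      else ac) _ ?hcong]
    case hcong =>
      intro ac k hk
      have hk0 : 0 ≤ k := ((PySem.List.mem_pyRange_iff_of_pos (s := 3) (by norm_num) k).mp (by
        simpa [hln] using hk)).1
      simp only []
      rw [show k + 3 + 1 = (k + 1) + 3 from by ring, show k + 3 + 2 = (k + 2) + 3 from by ring,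
        s1 k hk0, s1 (k + 1) (by omega), s1 (k + 2) (by omega)]
      exact if_congr (by rw [hln]; constructor <;> (intro; omega)) rfl rfl
    rw [← hln]
    rw [ih (fun l hl => hx l (by simp [hl]))]
    simp [pvChunks3]
  | case2 x h =>
    rcases x with _ | ⟨a, _ | ⟨b, _ | ⟨c, r⟩⟩⟩
    · rw [show PySem.List.pyRange 0 (PySem.List.len ([] : List (List Char))) 3 = [] from by decide]
      simp [pvChunks3]
    · have h1 : PySem.List.len [a] = 1 := by simp [PySem.List.len_eq]
      rw [h1, show PySem.List.pyRange 0 (1:Int) 3 = [0] from by decide, List.foldl_cons,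
        if_neg (by norm_num), List.foldl_nil]
      simp [pvChunks3]
    · have h2 : PySem.List.len [a, b] = 2 := by simp [PySem.List.len_eq]
      rw [h2, show PySem.List.pyRange 0 (2:Int) 3 = [0] from by decide, List.foldl_cons,
        if_neg (by norm_num), List.foldl_nil]
      simp [pvChunks3]
    · exact (h a b c r rfl).elim

-- ===== VERDICT (by name: the statement is the Claim_ definition above) =====
theorem parse_faculty_text_spec : Claim_equal_parse_faculty_text := by
  intro text _
  show parse_faculty_text text = parse_faculty_text_alt text
  unfold parse_faculty_text parse_faculty_text_alt
  have hx : ∀ l ∈ ((PySem.Chars.splitOn text.toList ['\n']).map PySem.Chars.strip).filter (fun l => l ≠ []),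
      PySem.Chars.strip l = l := by
    intro l hl
    simp only [List.mem_filter, List.mem_map] at hl
    obtain ⟨⟨y, _, rfl⟩, _⟩ := hl
    exact pv_strip_fix y
  simpa using pv_loop_eq _ hx []
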